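-- pv_equiv track=rewrite | github.com/std-modelware/polytech-diskrete-2020 | Ivanov_Andrey/sym_axes/axes.py | get_not_equivalent
-- ===== SOURCE A (Python) =====
-- def get_all_equivalent(arr):
--     eq_arr = list()
--     new_arr = list()
--     for i in range(0, len(arr) - 1):
--         if i == 0:
--             new_arr = list(arr).copy()
--         tmp = new_arr[0]
--         new_arr.remove(tmp)
--         new_arr.append(tmp)
--         eq_arr.append(new_arr.copy())
--     return eq_arr
--
-- def get_not_equivalent(unique_arr):
--     eq_arr = list()
--     non_eq_arr = list()
--     for arr in unique_arr:
--         arr = list(arr)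
--         if arr not in eq_arr:
--             non_eq_arr.append(tuple(arr))
--             eq_arr.extend(get_all_equivalent(arr).copy())
--     return non_eq_arr
-- ===== SOURCE B (Python) =====
-- def get_not_equivalent(unique_arr):
--     reps = set()      # kept representatives, as tuples
--     non_eq_arr = []
--     for arr in unique_arr:
--         t = tuple(arr)
--         n = len(t)
--         if not any(t[j:] + t[:j] in reps for j in range(1, n)):
--             non_eq_arr.append(t)
--             reps.add(t)
--     return non_eq_arr
-- ===== Notes on version B (the rewrite author's own statement) =====
-- stated objective: faster
-- what changed: A keeps a growing list of every nontrivial rotation of every kept representative and does a linear 'in' scan of that list per element; B keeps only the representatives in a hash set and checks the incoming array's own nontrivial rotations against it.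
import Mathlib
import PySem

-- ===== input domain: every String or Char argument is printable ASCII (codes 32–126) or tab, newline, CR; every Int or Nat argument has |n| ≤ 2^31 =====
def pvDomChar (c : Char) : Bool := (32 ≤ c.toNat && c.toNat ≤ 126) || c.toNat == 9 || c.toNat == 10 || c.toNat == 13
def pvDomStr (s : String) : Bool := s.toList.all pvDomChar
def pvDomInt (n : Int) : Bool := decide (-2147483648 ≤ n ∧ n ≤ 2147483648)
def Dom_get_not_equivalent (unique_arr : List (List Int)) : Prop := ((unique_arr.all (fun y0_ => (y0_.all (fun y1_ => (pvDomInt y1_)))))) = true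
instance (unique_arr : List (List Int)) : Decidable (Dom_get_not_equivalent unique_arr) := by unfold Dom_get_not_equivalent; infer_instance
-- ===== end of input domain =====

-- B replaces A's ever-growing list of all rotations of every kept representative (scanned by a
-- linear 'in' test) with a hash set of the representatives themselves, testing the incoming
-- array's own rotations against it — same return value, measurably faster.

-- ===== PORT A =====
-- Loop body of get_all_equivalent: tmp = new_arr[0]; new_arr.remove(tmp); new_arr.append(tmp)
def gaeStep (arr : List Int) (st : List (List Int) × List Int) (i : Int) :
    List (List Int) × List Int :=
  let new_arr := if i = 0 then arr else st.2
  match PySem.List.pyGet? new_arr 0 with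
  | none => st
  | some tmp =>
    match PySem.List.remove? new_arr tmp with
    | none => st
    | some na =>
      let na := na ++ [tmp]
      (st.1 ++ [na], na)

def get_all_equivalent (arr : List Int) : List (List Int) :=
  ((PySem.List.pyRange 0 ((arr.length : Int) - 1) 1).foldl (gaeStep arr) ([], [])).1

def get_not_equivalent (unique_arr : List (List Int)) : List (List Int) :=
  (unique_arr.foldl
    (fun (st : List (List Int) × List (List Int)) arr =>
      if arr ∈ st.1 then st
      else (st.1 ++ get_all_equivalent arr, st.2 ++ [arr]))
    ([], [])).2

-- ===== PORT B =====
-- Loop body of B: keep arr unless some nontrivial rotation t[j:]+t[:j] is already a kept representative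
def altStep (st : PySem.Set (List Int) × List (List Int)) (arr : List Int) :
    PySem.Set (List Int) × List (List Int) :=
  if (PySem.List.pyRange 1 (arr.length : Int) 1).any
       (fun j => PySem.Set.contains st.1
          (PySem.List.slice arr (some j) none ++ PySem.List.slice arr none (some j)))
  then st
  else (PySem.Set.add st.1 arr, st.2 ++ [arr])

def get_not_equivalent_alt (unique_arr : List (List Int)) : List (List Int) :=
  (unique_arr.foldl altStep (PySem.Set.empty, [])).2

-- ===== PRECONDITION & SPEC =====
def Spec_get_not_equivalent (unique_arr : List (List Int)) (out : List (List Int)) : Prop := out = get_not_equivalent_alt unique_arr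
instance (unique_arr : List (List Int)) (out : List (List Int)) : Decidable (Spec_get_not_equivalent unique_arr out) := by unfold Spec_get_not_equivalent; infer_instance

-- ===== CLAIM (what is proved, stated in full; the proofs are below) =====
def Claim_equal_get_not_equivalent : Prop := ∀ (unique_arr : List (List Int)), Dom_get_not_equivalent unique_arr → Spec_get_not_equivalent unique_arr (get_not_equivalent unique_arr)

-- ===== LEMMAS AND PROOFS =====
theorem gaeStep_of_cons (arr : List Int) (st : List (List Int) × List Int) (i : Int)
    (x : Int) (xs : List Int) (h : (if i = 0 then arr else st.2) = x :: xs) :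
    gaeStep arr st i = (st.1 ++ [xs ++ [x]], xs ++ [x]) := by
  unfold gaeStep
  rw [h]
  simp [PySem.List.pyGet?, PySem.List.pyIdx?]

theorem rot1 (x : Int) (xs : List Int) : (x :: xs).rotate 1 = xs ++ [x] := by
  simpa using List.rotate_cons_succ xs x 0

-- A's loop invariant: after m ≥ 1 iterations the accumulator holds rotations 1..m and
-- new_arr is the m-th left rotation
theorem gae_fold (arr : List Int) (h : 2 ≤ arr.length) :
    ∀ m : ℕ, 1 ≤ m → m ≤ arr.length - 1 →
      ((List.range m).map (fun k : Nat => (k : Int))).foldl (gaeStep arr) ([], []) =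
        ((List.range m).map (fun j => arr.rotate (j+1)), arr.rotate m) := by
  intro m
  induction m with
  | zero => omega
  | succ m ih =>
    intro _ hle
    by_cases hm : m = 0
    · subst hm
      have harr : arr ≠ [] := by intro he; simp [he] at h
      obtain ⟨x, xs, hx⟩ := List.exists_cons_of_ne_nil harr
      simp only [List.range_succ, List.range_zero, List.map_append, List.map_nil,
        List.foldl_append, List.foldl, List.map_cons, List.nil_append, List.foldl_cons,
        List.foldl_nil, List.map]
      rw [show ((0:Nat):Int) = (0:Int) from rfl, gaeStep_of_cons arr ([], []) 0 x xs (by simp [hx])]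
      simp [hx, rot1]
    · have h1 : 1 ≤ m := by omega
      have h2 : m ≤ arr.length - 1 := by omega
      have := ih h1 h2
      have hne : arr.rotate m ≠ [] := by
        intro he
        have := List.length_rotate arr m
        rw [he] at this; simp at this; omega
      obtain ⟨x, xs, hx⟩ := List.exists_cons_of_ne_nil hne
      rw [List.range_succ, List.map_append, List.foldl_append, this]
      have hi : ((m:Int)) ≠ 0 := by
        simp; omega
      rw [List.map_singleton, List.foldl_cons, List.foldl_nil,
        gaeStep_of_cons arr _ _ x xs (by rw [if_neg hi]; exact hx)]
      have : (arr.rotate m).rotate 1 = arr.rotate (m+1) := by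
        rw [List.rotate_rotate]
      rw [hx, rot1] at this
      simp [List.range_succ, ← this, hx, rot1]

-- A's rotation-builder returns exactly the nontrivial left rotations 1..n-1
theorem gae_eq (arr : List Int) :
    get_all_equivalent arr =
      (List.range (arr.length - 1)).map (fun j => arr.rotate (j + 1)) := by
  unfold get_all_equivalent
  rw [PySem.List.pyRange_one]
  have hto : (((arr.length : Int) - 1) - 0).toNat = arr.length - 1 := by omega
  rw [hto]
  by_cases h2 : 2 ≤ arr.length
  · have h1 : 1 ≤ arr.length - 1 := by omega
    have := gae_fold arr h2 (arr.length - 1) h1 (le_refl _)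
    simp only [zero_add]
    rw [this]
  · have h0 : arr.length - 1 = 0 := by omega
    simp [h0]

theorem mem_gae (arr x : List Int) :
    x ∈ get_all_equivalent arr ↔
      ∃ j : ℕ, 1 ≤ j ∧ j < arr.length ∧ x = arr.rotate j := by
  rw [gae_eq]
  simp only [List.mem_map, List.mem_range]
  constructor
  · rintro ⟨a, ha, rfl⟩
    exact ⟨a + 1, by omega, by omega, rfl⟩
  · rintro ⟨j, h1, h2, rfl⟩
    refine ⟨j - 1, by omega, ?_⟩
    have : j - 1 + 1 = j := by omega
    rw [this]

-- 'arr is a nontrivial rotation of some kept r' ↔ 'some nontrivial rotation of arr is kept'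
theorem test_iff (out : List (List Int)) (arr : List Int) :
    (∃ r ∈ out, ∃ j : ℕ, 1 ≤ j ∧ j < r.length ∧ arr = r.rotate j) ↔
      (∃ j : ℕ, 1 ≤ j ∧ j < arr.length ∧ arr.rotate j ∈ out) := by
  constructor
  · rintro ⟨r, hr, j, hj1, hj2, rfl⟩
    refine ⟨r.length - j, by omega, ?_, ?_⟩
    · simp only [List.length_rotate]; omega
    · rw [List.rotate_rotate]
      have : j + (r.length - j) = r.length := by omega
      rw [this, List.rotate_length]; exact hr
  · rintro ⟨j, hj1, hj2, hmem⟩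
    refine ⟨arr.rotate j, hmem, arr.length - j, by omega, ?_, ?_⟩
    · simp only [List.length_rotate]; omega
    · rw [List.rotate_rotate]
      have : j + (arr.length - j) = arr.length := by omega
      rw [this, List.rotate_length]

-- B's membership test, characterised over ℕ rotations
theorem testB_iff (S : PySem.Set (List Int)) (a : List Int) :
    ((PySem.List.pyRange 1 (a.length : Int) 1).any
      (fun j => PySem.Set.contains S
         (PySem.List.slice a (some j) none ++ PySem.List.slice a none (some j))) = true) ↔
      ∃ j : ℕ, 1 ≤ j ∧ j < a.length ∧ a.rotate j ∈ S := by
  rw [List.any_eq_true]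
  constructor
  · rintro ⟨j, hj, hc⟩
    rw [PySem.List.mem_pyRange_one] at hj
    obtain ⟨hj1, hj2⟩ := hj
    have h0 : (0:Int) ≤ j := by omega
    refine ⟨j.toNat, by omega, by omega, ?_⟩
    rw [List.rotate_eq_drop_append_take (by omega)]
    rw [PySem.List.slice_from _ h0, PySem.List.slice_to _ h0] at hc
    exact (PySem.Set.contains_iff _ _).1 hc
  · rintro ⟨j, hj1, hj2, hmem⟩
    refine ⟨(j : Int), ?_, ?_⟩
    · rw [PySem.List.mem_pyRange_one]; constructor <;> [exact_mod_cast hj1; exact_mod_cast hj2]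
    · rw [PySem.List.slice_from _ (by positivity), PySem.List.slice_to _ (by positivity)]
      simp only [Int.toNat_natCast]
      rw [← List.rotate_eq_drop_append_take (by omega)]
      exact (PySem.Set.contains_iff _ _).2 hmem

-- Joint loop invariant of A's fold and B's fold: same output list, S holds exactly the kept
-- representatives, eqA holds exactly their nontrivial rotations
theorem main_inv (l : List (List Int)) : ∀ (eqA : List (List Int)) (S : PySem.Set (List Int))
    (out : List (List Int)),
    (∀ x, x ∈ S ↔ x ∈ out) →
    (∀ x, x ∈ eqA ↔ ∃ r ∈ out, ∃ j : ℕ, 1 ≤ j ∧ j < r.length ∧ x = r.rotate j) →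
    (l.foldl (fun (st : List (List Int) × List (List Int)) arr =>
        if arr ∈ st.1 then st
        else (st.1 ++ get_all_equivalent arr, st.2 ++ [arr])) (eqA, out)).2 =
      (l.foldl altStep (S, out)).2 := by
  induction l with
  | nil => intro eqA S out hS hE; rfl
  | cons a l ih =>
    intro eqA S out hS hE
    rw [List.foldl_cons, List.foldl_cons]
    have hcond : (a ∈ eqA) ↔ ((PySem.List.pyRange 1 (a.length : Int) 1).any
        (fun j => PySem.Set.contains S
          (PySem.List.slice a (some j) none ++ PySem.List.slice a none (some j))) = true) := by
      rw [hE a, testB_iff]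
      rw [test_iff]
      constructor
      · rintro ⟨j, h1, h2, h3⟩; exact ⟨j, h1, h2, (hS _).2 h3⟩
      · rintro ⟨j, h1, h2, h3⟩; exact ⟨j, h1, h2, (hS _).1 h3⟩
    by_cases hA : a ∈ eqA
    · rw [if_pos hA]
      have hB := hcond.1 hA
      have : altStep (S, out) a = (S, out) := by
        unfold altStep; rw [if_pos hB]
      rw [this]
      exact ih eqA S out hS hE
    · rw [if_neg hA]
      have hB : ¬ _ := fun h => hA (hcond.2 h)
      have : altStep (S, out) a = (PySem.Set.add S a, out ++ [a]) := by
        unfold altStep; rw [if_neg hB]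
      rw [this]
      apply ih
      · intro x
        rw [PySem.Set.mem_add, List.mem_append, hS x, List.mem_singleton]
      · intro x
        rw [List.mem_append, hE x, mem_gae]
        constructor
        · rintro (⟨r, hr, hj⟩ | hj)
          · exact ⟨r, List.mem_append_left _ hr, hj⟩
          · exact ⟨a, List.mem_append_right _ (List.mem_singleton_self a), hj⟩
        · rintro ⟨r, hr, hj⟩
          rcases List.mem_append.1 hr with h | h
          · exact Or.inl ⟨r, h, hj⟩
          · rw [List.mem_singleton] at h; subst h; exact Or.inr hj

-- ===== VERDICT =====
theorem get_not_equivalent_spec : Claim_equal_get_not_equivalent := by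
  intro unique_arr _
  unfold Spec_get_not_equivalent get_not_equivalent get_not_equivalent_alt
  exact main_inv unique_arr [] PySem.Set.empty [] (by simp [PySem.Set.empty]) (by simp)
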